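-- pv_equiv track=rewrite | github.com/GregWatson/wordle_helper | whelp.py | get_best_words
-- ===== SOURCE A (Python) =====
-- def get_best_words(ok_words, all_found):
--     best_word = ''
--     best_score = 0
--     for word in ok_words:
--         score = 0
--         for l in word:
--             if l in all_found:
--                 continue
--             for w in ok_words:
--                 if w == word:
--                     continue
--                 if l in w:
--                     score = score + 1
--         if score >= best_score:
--             best_score = score
--             best_word = word
--     return best_word
-- ===== SOURCE B (Python) =====
-- def get_best_words(ok_words, all_found):
--     found = set(all_found)
--     cnt = {}                       # letter -> number of entries of ok_words containing it
--     for w in ok_words: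
--         for l in set(w):
--             cnt[l] = cnt.get(l, 0) + 1
--     mult = {}                      # word -> multiplicity in ok_words
--     for w in ok_words:
--         mult[w] = mult.get(w, 0) + 1
--     best_word = ''
--     best_score = 0
--     for word in ok_words:
--         m = mult[word]
--         score = sum(cnt[l] - m for l in word if l not in found)
--         if score >= best_score:
--             best_score = score
--             best_word = word
--     return best_word
-- ===== Notes on version B (the rewrite author's own statement) =====
-- stated objective: faster
-- what changed: Replaces the cubic per-word-per-letter rescan of ok_words by two dictionaries precomputed in one pass (letter -> number of entries containing it, word -> multiplicity), so each word's score is cnt[l]-mult[word] summed over its unseen letters.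
import Mathlib
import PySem

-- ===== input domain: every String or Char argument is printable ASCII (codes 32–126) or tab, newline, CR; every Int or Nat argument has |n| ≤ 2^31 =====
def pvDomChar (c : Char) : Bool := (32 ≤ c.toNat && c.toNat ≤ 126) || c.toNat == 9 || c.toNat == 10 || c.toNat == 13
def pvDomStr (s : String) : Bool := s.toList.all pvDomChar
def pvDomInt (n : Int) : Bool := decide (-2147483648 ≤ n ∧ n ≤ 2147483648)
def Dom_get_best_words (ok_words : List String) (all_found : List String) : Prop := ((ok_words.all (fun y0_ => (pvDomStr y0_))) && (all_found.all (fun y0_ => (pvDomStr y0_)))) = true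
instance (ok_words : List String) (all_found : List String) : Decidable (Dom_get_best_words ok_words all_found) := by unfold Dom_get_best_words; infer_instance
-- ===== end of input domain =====

-- B replaces A's cubic rescan (for every word, for every letter, a scan of all words)
-- by two precomputed counters (letter -> #words containing it, word -> multiplicity),
-- scoring each word in one pass: asymptotically faster, same result.

-- ===== PORT A =====
-- Python's `l in w` for the 1-char string l is exactly char membership: w.toList.contains l.
-- Python's `l in all_found` is list membership of the 1-char string: all_found.contains (String.singleton l).
def get_best_words (ok_words : List String) (all_found : List String) : String :=
  (ok_words.foldl (fun (st : String × Int) word =>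
      let score : Int := word.toList.foldl (fun (score : Int) l =>
        if all_found.contains (String.singleton l) then score
        else ok_words.foldl (fun (s : Int) w =>
          if w == word then s
          else if w.toList.contains l then s + 1 else s) score) 0
      if score ≥ st.2 then (word, score) else st) ("", 0)).1

-- ===== PORT B =====
def get_best_words_alt (ok_words : List String) (all_found : List String) : String :=
  let found : PySem.Set String := PySem.Set.ofList all_found
  let cnt : PySem.Dict Char Int := ok_words.foldl (fun d w =>
      (PySem.Set.ofList w.toList).foldl (fun d2 l => d2.modify l 0 (· + 1)) d) PySem.Dict.empty
  let mult : PySem.Dict String Int := ok_words.foldl (fun d w => d.modify w 0 (· + 1)) PySem.Dict.empty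
  (ok_words.foldl (fun (st : String × Int) word =>
      let m : Int := mult.getD word 0
      let score : Int :=
        ((word.toList.filter (fun l => !(PySem.Set.contains found (String.singleton l)))).map
          (fun l => cnt.getD l 0 - m)).sum
      if score ≥ st.2 then (word, score) else st) ("", 0)).1

-- ===== PRECONDITION & SPEC =====
def Spec_get_best_words (ok_words : List String) (all_found : List String) (out : String) : Prop := out = get_best_words_alt ok_words all_found
instance (ok_words : List String) (all_found : List String) (out : String) : Decidable (Spec_get_best_words ok_words all_found out) := by unfold Spec_get_best_words; infer_instance

-- ===== CLAIM (what is proved, stated in full; the proofs are below) =====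
def Claim_equal_get_best_words : Prop := ∀ (ok_words : List String) (all_found : List String), Dom_get_best_words ok_words all_found → Spec_get_best_words ok_words all_found (get_best_words ok_words all_found)

-- ===== LEMMAS AND PROOFS =====

-- set(xs) contains = list contains
lemma set_contains_ofList (xs : List String) (y : String) :
    PySem.Set.contains (PySem.Set.ofList xs) y = xs.contains y := by
  simp [PySem.Set.contains_eq_listContains, PySem.Set.mem_ofList]

-- count of an element in a deduped list
lemma count_ofList_chars (xs : List Char) (c : Char) :
    (PySem.Set.ofList xs).count c = if xs.contains c then 1 else 0 := by
  by_cases h : c ∈ xs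
  · rw [List.count_eq_one_of_mem (PySem.Set.nodup_ofList xs) ((PySem.Set.mem_ofList xs c).2 h), if_pos (by simpa using h)]
  · simp [List.count_eq_zero.2 (fun hc => h ((PySem.Set.mem_ofList xs c).1 hc)), h]

-- B's cnt dict characterised
lemma cnt_getD (ws : List String) (c : Char) (d : PySem.Dict Char Int) :
    (ws.foldl (fun d w => (PySem.Set.ofList w.toList).foldl (fun d2 l => d2.modify l 0 (· + 1)) d) d).getD c 0
      = d.getD c 0 + (ws.countP (fun w => w.toList.contains c) : Int) := by
  induction ws generalizing d with
  | nil => simp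
  | cons w t ih =>
      rw [List.foldl_cons, ih, PySem.Dict.getD_foldl_modify_add_one, count_ofList_chars,
        List.countP_cons]
      by_cases h : w.toList.contains c = true
      · rw [if_pos h]; push_cast; ring
      · rw [if_neg h]; push_cast; ring

-- A's innermost loop
lemma innerA (ws : List String) (word : String) (l : Char) (s : Int) :
    ws.foldl (fun (s : Int) w => if w == word then s else if w.toList.contains l then s + 1 else s) s
      = s + (ws.countP (fun w => !(w == word) && w.toList.contains l) : Int) := by
  induction ws generalizing s with
  | nil => simp
  | cons w t ih =>
      rw [List.foldl_cons, List.countP_cons]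
      by_cases h1 : (w == word) = true
      · have hp : (!(w == word) && w.toList.contains l) = false := by
          rw [h1]; rfl
        rw [if_pos h1, ih, hp, if_neg Bool.false_ne_true]; push_cast; ring
      · have hb1 : (w == word) = false := Bool.eq_false_iff.2 h1
        rw [if_neg h1]
        by_cases h2 : w.toList.contains l = true
        · have hp : (!(w == word) && w.toList.contains l) = true := by
            rw [hb1, h2]; rfl
          rw [if_pos h2, ih, hp, if_pos rfl]; push_cast; ring
        · have h2' : w.toList.contains l = false := Bool.eq_false_iff.2 h2
          have hp : (!(w == word) && w.toList.contains l) = false := by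
            rw [h2', Bool.and_false]
          rw [if_neg h2, ih, hp, if_neg Bool.false_ne_true]; push_cast; ring

-- count split when the letter occurs in word (Nat form)
lemma count_split_nat (ws : List String) (word : String) (l : Char) (hl : l ∈ word.toList) :
    ws.countP (fun w => !(w == word) && w.toList.contains l) + ws.count word
      = ws.countP (fun w => w.toList.contains l) := by
  induction ws with
  | nil => simp
  | cons w t ih =>
      rw [List.countP_cons, List.countP_cons, List.count_cons]
      by_cases h1 : (w == word) = true
      · have hw : w = word := by simpa using h1
        have hc : w.toList.contains l = true := by subst hw; simpa using hl
        have hp : (!(w == word) && w.toList.contains l) = false := by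
          rw [h1]; rfl
        rw [hp, hc, h1]
        simp only [if_neg Bool.false_ne_true]
        omega
      · have hb1 : (w == word) = false := Bool.eq_false_iff.2 h1
        by_cases h2 : w.toList.contains l = true
        · have hp : (!(w == word) && w.toList.contains l) = true := by
            rw [hb1, h2]; rfl
          rw [hp, h2, hb1]
          simp only [if_neg Bool.false_ne_true]
          omega
        · have h2' : w.toList.contains l = false := Bool.eq_false_iff.2 h2
          have hp : (!(w == word) && w.toList.contains l) = false := by
            rw [h2', Bool.and_false]
          rw [hp, h2', hb1]
          simp only [if_neg Bool.false_ne_true]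
          omega

lemma count_split (ws : List String) (word : String) (l : Char) (hl : l ∈ word.toList) :
    (ws.countP (fun w => !(w == word) && w.toList.contains l) : Int)
      = (ws.countP (fun w => w.toList.contains l) : Int) - (ws.count word : Int) := by
  have := count_split_nat ws word l hl
  omega

-- generic skip/add fold = sum over filtered map
lemma middle_fold (p : Char → Bool) (K : Char → Int) (chars : List Char) (a : Int) :
    chars.foldl (fun acc c => if p c then acc else acc + K c) a
      = a + ((chars.filter (fun c => !p c)).map K).sum := by
  induction chars generalizing a with
  | nil => simp
  | cons c t ih =>
      by_cases h : p c = true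
      · rw [List.foldl_cons, if_pos h, ih, List.filter_cons_of_neg (by simp [h])]
      · rw [List.foldl_cons, if_neg h, ih, List.filter_cons_of_pos (by simp [h])]
        simp; ring

-- per-word score equality
lemma score_eq (ok af : List String) (word : String) :
    word.toList.foldl (fun (score : Int) l =>
        if af.contains (String.singleton l) then score
        else ok.foldl (fun (s : Int) w =>
          if w == word then s
          else if w.toList.contains l then s + 1 else s) score) 0
    = ((word.toList.filter (fun l => !(PySem.Set.contains (PySem.Set.ofList af) (String.singleton l)))).map
        (fun l => (ok.foldl (fun d w => (PySem.Set.ofList w.toList).foldl (fun d2 l2 => d2.modify l2 0 (· + 1)) d) PySem.Dict.empty).getD l 0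
          - (ok.foldl (fun d w => d.modify w 0 (· + 1)) PySem.Dict.empty).getD word 0)).sum := by
  have hfilter : (fun l => !(PySem.Set.contains (PySem.Set.ofList af) (String.singleton l)))
      = (fun l => !(af.contains (String.singleton l))) := by
    funext l; rw [set_contains_ofList]
  have hf : (fun (score : Int) (l : Char) =>
      if af.contains (String.singleton l) then score
      else ok.foldl (fun (s : Int) w =>
        if w == word then s
        else if w.toList.contains l then s + 1 else s) score)
    = (fun (score : Int) (l : Char) =>
      if af.contains (String.singleton l) then score
      else score + (ok.countP (fun w => !(w == word) && w.toList.contains l) : Int)) := by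
    funext score l
    by_cases h : af.contains (String.singleton l) = true
    · rw [if_pos h, if_pos h]
    · rw [if_neg h, if_neg h, innerA]
  rw [hf, hfilter, middle_fold (fun l => af.contains (String.singleton l))
        (fun l => (ok.countP (fun w => !(w == word) && w.toList.contains l) : Int)) word.toList 0,
    zero_add]
  apply congrArg List.sum
  apply List.map_congr_left
  intro l hlf
  have hl : l ∈ word.toList := List.mem_of_mem_filter hlf
  rw [count_split ok word l hl, cnt_getD, PySem.Dict.getD_foldl_modify_add_one]
  simp

-- main equality
lemma main_eq (ok af : List String) : get_best_words ok af = get_best_words_alt ok af := by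
  unfold get_best_words get_best_words_alt
  simp only []
  congr 2
  funext st word
  simp only [score_eq ok af word]

-- ===== VERDICT (by name: the statement is the Claim_ definition above) =====
theorem get_best_words_spec : Claim_equal_get_best_words := by
  intro ok af _
  unfold Spec_get_best_words
  exact main_eq ok af
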